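-- pv_equiv track=rewrite | github.com/uglygooose/Greenlink | app/pricing.py | pricing_tags_from_values
-- ===== SOURCE A (Python) =====
-- from typing import Any, Iterable, Optional
--
-- def _normalize_str(value: Optional[str]) -> Optional[str]:
--     if value is None:
--         return None
--     value = value.strip().lower()
--     return value or None
--
-- def pricing_tags_from_values(*values: Any) -> tuple[str, ...]:
--     tags: set[str] = set()
--     for value in values:
--         raw = _normalize_str(str(value or ""))
--         if not raw:
--             continue
--         if "pob" in raw or "weekday" in raw:
--             tags.add("weekday_member")
--         if "student" in raw:
--             tags.add("student")
--         if "scholar" in raw: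
--             tags.add("scholar")
--             tags.add("junior")
--         if "junior" in raw or "academy" in raw:
--             tags.add("junior")
--         if "pensioner" in raw or "veteran" in raw or "60yr" in raw or "60 yr" in raw:
--             tags.add("pensioner")
--         if "pmg" in raw:
--             tags.add("pmg")
--         if "caddie" in raw or "caddy" in raw:
--             tags.add("caddie")
--     return tuple(sorted(tags))
-- ===== SOURCE B (Python) =====
-- # Transposed decomposition: normalize all values once, then emit tags in fixed
-- # alphabetical order by an any()-scan per tag -- no set, no final sort.
-- _TAG_KEYWORDS = [
--     ("caddie", ("caddie", "caddy")),
--     ("junior", ("scholar", "junior", "academy")),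
--     ("pensioner", ("pensioner", "veteran", "60yr", "60 yr")),
--     ("pmg", ("pmg",)),
--     ("scholar", ("scholar",)),
--     ("student", ("student",)),
--     ("weekday_member", ("pob", "weekday")),
-- ]
--
-- def pricing_tags_from_values(*values):
--     raws = [str(v or "").strip().lower() for v in values]
--     return tuple(tag for tag, kws in _TAG_KEYWORDS
--                  if any(k in r for r in raws for k in kws))
-- ===== Notes on version B (the rewrite author's own statement) =====
-- stated objective: simpler
-- what changed: The loops are transposed and the set and the sort are eliminated: instead of accumulating a mutable set per value and sorting it at the end, B normalizes all values once, then walks a fixed alphabetically-ordered tag table and emits each tag whose keywords hit any normalized value, so the output is built directly in sorted order.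
import Mathlib
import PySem

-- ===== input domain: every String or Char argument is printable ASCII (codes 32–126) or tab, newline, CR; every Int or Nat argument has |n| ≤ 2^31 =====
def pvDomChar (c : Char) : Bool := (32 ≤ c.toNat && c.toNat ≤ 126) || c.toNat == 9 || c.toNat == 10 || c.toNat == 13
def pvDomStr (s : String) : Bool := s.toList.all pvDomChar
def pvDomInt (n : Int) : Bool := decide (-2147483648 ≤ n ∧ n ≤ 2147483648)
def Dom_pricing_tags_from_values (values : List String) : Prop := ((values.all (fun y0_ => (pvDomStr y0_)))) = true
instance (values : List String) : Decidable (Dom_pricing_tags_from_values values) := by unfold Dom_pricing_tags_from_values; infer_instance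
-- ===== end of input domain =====

-- B transposes the loops and drops the set and the sort: a fixed alphabetically-ordered tag table is scanned once, emitting each tag whose keywords hit any normalized value (simpler).


-- ===== PORT A =====
-- _normalize_str(value): strip, then lower, empty -> None
def pv_normalize_str (value : Option String) : Option String :=
  match value with
  | none => none
  | some v =>
    let v := PySem.Str.lower (PySem.Str.strip v)
    if v = "" then none else some v

-- body of A's for-loop over one value (tags is the accumulated set); str(value or "") on a str is the if-expression
def pvStepA (tags : PySem.Set String) (value : String) : PySem.Set String :=
  match pv_normalize_str (some (if value = "" then "" else value)) with
  | none => tags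
  | some raw =>
    let tags := if (PySem.Str.isIn "pob" raw || PySem.Str.isIn "weekday" raw) then PySem.Set.add tags "weekday_member" else tags
    let tags := if PySem.Str.isIn "student" raw then PySem.Set.add tags "student" else tags
    let tags := if PySem.Str.isIn "scholar" raw then PySem.Set.add (PySem.Set.add tags "scholar") "junior" else tags
    let tags := if (PySem.Str.isIn "junior" raw || PySem.Str.isIn "academy" raw) then PySem.Set.add tags "junior" else tags
    let tags := if (PySem.Str.isIn "pensioner" raw || (PySem.Str.isIn "veteran" raw || (PySem.Str.isIn "60yr" raw || PySem.Str.isIn "60 yr" raw))) then PySem.Set.add tags "pensioner" else tags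
    let tags := if PySem.Str.isIn "pmg" raw then PySem.Set.add tags "pmg" else tags
    let tags := if (PySem.Str.isIn "caddie" raw || PySem.Str.isIn "caddy" raw) then PySem.Set.add tags "caddie" else tags
    tags

def pricing_tags_from_values (values : List String) : List String :=
  PySem.List.sorted (values.foldl pvStepA PySem.Set.empty) (fun x => x) false

-- ===== PORT B =====
-- the fixed alphabetically-ordered (tag, keywords) table
def pvTagRules : List (String × List String) :=
  [ ("caddie", ["caddie", "caddy"])
  , ("junior", ["scholar", "junior", "academy"])
  , ("pensioner", ["pensioner", "veteran", "60yr", "60 yr"])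
  , ("pmg", ["pmg"])
  , ("scholar", ["scholar"])
  , ("student", ["student"])
  , ("weekday_member", ["pob", "weekday"]) ]

-- raws = [str(v or "").strip().lower() for v in values]; then the tuple-comprehension over the table
def pricing_tags_from_values_alt (values : List String) : List String :=
  let raws := values.map (fun v => PySem.Str.lower (PySem.Str.strip (if v = "" then "" else v)))
  (pvTagRules.filter (fun tr => raws.any (fun r => tr.2.any (fun k => PySem.Str.isIn k r)))).map Prod.fst

-- ===== PRECONDITION & SPEC =====
def Spec_pricing_tags_from_values (values : List String) (out : List String) : Prop := out = pricing_tags_from_values_alt values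
instance (values : List String) (out : List String) : Decidable (Spec_pricing_tags_from_values values out) := by unfold Spec_pricing_tags_from_values; infer_instance

-- ===== CLAIM =====
def Claim_equal_pricing_tags_from_values : Prop := ∀ (values : List String), Dom_pricing_tags_from_values values → Spec_pricing_tags_from_values values (pricing_tags_from_values values)

-- ===== LEMMAS AND PROOFS =====

def pvRaw (v : String) : String := PySem.Str.lower (PySem.Str.strip v)

-- whether A's branch for tag x fires on the value v
def pvHit (x v : String) : Bool :=
  pvTagRules.any (fun p => p.1 == x && p.2.any (fun k => PySem.Str.isIn k (pvRaw v)))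

lemma pv_if_id (v : String) : (if v = "" then "" else v) = v := by
  split <;> simp_all

-- one guarded add / guarded double add, as named functions (so the let-chain of pvStepA composes without duplication)
def pvIteAdd (c : Prop) [Decidable c] (y : String) (t : PySem.Set String) : PySem.Set String :=
  if c then PySem.Set.add t y else t

def pvIteAdd2 (c : Prop) [Decidable c] (a b : String) (t : PySem.Set String) : PySem.Set String :=
  if c then PySem.Set.add (PySem.Set.add t a) b else t

def pvChain (raw : String) (t : PySem.Set String) : PySem.Set String :=
  pvIteAdd ((PySem.Str.isIn "caddie" raw || PySem.Str.isIn "caddy" raw) = true) "caddie"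
    (pvIteAdd (PySem.Str.isIn "pmg" raw = true) "pmg"
      (pvIteAdd ((PySem.Str.isIn "pensioner" raw || (PySem.Str.isIn "veteran" raw || (PySem.Str.isIn "60yr" raw || PySem.Str.isIn "60 yr" raw))) = true) "pensioner"
        (pvIteAdd ((PySem.Str.isIn "junior" raw || PySem.Str.isIn "academy" raw) = true) "junior"
          (pvIteAdd2 (PySem.Str.isIn "scholar" raw = true) "scholar" "junior"
            (pvIteAdd (PySem.Str.isIn "student" raw = true) "student"
              (pvIteAdd ((PySem.Str.isIn "pob" raw || PySem.Str.isIn "weekday" raw) = true) "weekday_member" t))))))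

lemma pvStepA_eq (t : PySem.Set String) (v : String) :
    pvStepA t v = if pvRaw v = "" then t else pvChain (pvRaw v) t := by
  unfold pvStepA pv_normalize_str pvRaw
  rw [pv_if_id]
  by_cases h : PySem.Str.lower (PySem.Str.strip v) = ""
  · simp [h]
  · simp only [if_neg h]
    rfl

lemma pv_mem_iteAdd (c : Prop) [Decidable c] (y x : String) (t : PySem.Set String) :
    x ∈ pvIteAdd c y t ↔ x ∈ t ∨ (c ∧ x = y) := by
  unfold pvIteAdd
  by_cases hc : c <;> simp [hc, PySem.Set.mem_add]

lemma pv_mem_iteAdd2 (c : Prop) [Decidable c] (a b x : String) (t : PySem.Set String) :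
    x ∈ pvIteAdd2 c a b t ↔ x ∈ t ∨ (c ∧ (x = a ∨ x = b)) := by
  unfold pvIteAdd2
  by_cases hc : c <;> simp [hc, PySem.Set.mem_add, or_assoc]

set_option maxHeartbeats 1600000 in
lemma pv_mem_stepA (t : PySem.Set String) (v x : String) :
    x ∈ pvStepA t v ↔ x ∈ t ∨ pvHit x v = true := by
  rw [pvStepA_eq]
  by_cases h : pvRaw v = ""
  · have e1 : PySem.Chars.isIn ['c', 'a', 'd', 'd', 'i', 'e'] [] = false := by decide
    have e2 : PySem.Chars.isIn ['c', 'a', 'd', 'd', 'y'] [] = false := by decide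
    have e3 : PySem.Chars.isIn ['s', 'c', 'h', 'o', 'l', 'a', 'r'] [] = false := by decide
    have e4 : PySem.Chars.isIn ['j', 'u', 'n', 'i', 'o', 'r'] [] = false := by decide
    have e5 : PySem.Chars.isIn ['a', 'c', 'a', 'd', 'e', 'm', 'y'] [] = false := by decide
    have e6 : PySem.Chars.isIn ['p', 'e', 'n', 's', 'i', 'o', 'n', 'e', 'r'] [] = false := by decide
    have e7 : PySem.Chars.isIn ['v', 'e', 't', 'e', 'r', 'a', 'n'] [] = false := by decide
    have e8 : PySem.Chars.isIn ['6', '0', 'y', 'r'] [] = false := by decide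
    have e9 : PySem.Chars.isIn ['6', '0', ' ', 'y', 'r'] [] = false := by decide
    have e10 : PySem.Chars.isIn ['p', 'm', 'g'] [] = false := by decide
    have e11 : PySem.Chars.isIn ['s', 't', 'u', 'd', 'e', 'n', 't'] [] = false := by decide
    have e12 : PySem.Chars.isIn ['p', 'o', 'b'] [] = false := by decide
    have e13 : PySem.Chars.isIn ['w', 'e', 'e', 'k', 'd', 'a', 'y'] [] = false := by decide
    simp [h, pvHit, pvTagRules, e1, e2, e3, e4, e5, e6, e7, e8, e9, e10, e11, e12, e13]
  · simp only [if_neg h, pvChain, pv_mem_iteAdd, pv_mem_iteAdd2, pvHit, pvTagRules,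
      List.any_cons, List.any_nil, Bool.or_eq_true, Bool.and_eq_true, Bool.or_false, beq_iff_eq]
    constructor
    · rintro (((((((h' | ⟨c, rfl⟩) | ⟨c, rfl⟩) | ⟨c, rfl | rfl⟩) | ⟨c, rfl⟩) | ⟨c, rfl⟩) | ⟨c, rfl⟩) | ⟨c, rfl⟩)
      · exact Or.inl h'
      all_goals (simp [PySem.Str.isIn] at c; simp [c])
    · rintro (h' | ⟨rfl, c⟩ | ⟨rfl, c | c⟩ | ⟨rfl, c⟩ | ⟨rfl, c⟩ | ⟨rfl, c⟩ | ⟨rfl, c⟩ | ⟨rfl, c⟩)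
      · exact Or.inl (Or.inl (Or.inl (Or.inl (Or.inl (Or.inl (Or.inl h'))))))
      all_goals (simp [PySem.Str.isIn] at c; simp [c])

lemma pv_mem_fold (values : List String) (t : PySem.Set String) (x : String) :
    x ∈ values.foldl pvStepA t ↔ x ∈ t ∨ values.any (fun v => pvHit x v) = true := by
  induction values generalizing t with
  | nil => simp
  | cons v vs ih => simp [List.foldl, ih, pv_mem_stepA, or_assoc]

lemma pv_nodup_iteAdd (c : Prop) [Decidable c] (y : String) (t : PySem.Set String) (h : t.Nodup) :
    (pvIteAdd c y t).Nodup := by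
  unfold pvIteAdd
  split
  · exact PySem.Set.nodup_add _ _ h
  · exact h

lemma pv_nodup_iteAdd2 (c : Prop) [Decidable c] (a b : String) (t : PySem.Set String) (h : t.Nodup) :
    (pvIteAdd2 c a b t).Nodup := by
  unfold pvIteAdd2
  split
  · exact PySem.Set.nodup_add _ _ (PySem.Set.nodup_add _ _ h)
  · exact h

lemma pv_nodup_stepA (t : PySem.Set String) (v : String) (h : t.Nodup) : (pvStepA t v).Nodup := by
  rw [pvStepA_eq]
  split
  · exact h
  · unfold pvChain
    apply pv_nodup_iteAdd
    apply pv_nodup_iteAdd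
    apply pv_nodup_iteAdd
    apply pv_nodup_iteAdd
    apply pv_nodup_iteAdd2
    apply pv_nodup_iteAdd
    apply pv_nodup_iteAdd
    exact h

lemma pv_nodup_fold (values : List String) (t : PySem.Set String) (h : t.Nodup) :
    (values.foldl pvStepA t).Nodup := by
  induction values generalizing t with
  | nil => exact h
  | cons v vs ih =>
    rw [List.foldl_cons]
    exact ih _ (pv_nodup_stepA _ _ h)

lemma pv_sublist (cond : String × List String → Bool) :
    ((pvTagRules.filter cond).map Prod.fst).Sublist (pvTagRules.map Prod.fst) :=
  List.Sublist.map Prod.fst List.filter_sublist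

-- ===== VERDICT =====
set_option maxHeartbeats 1000000 in
theorem pricing_tags_from_values_spec : Claim_equal_pricing_tags_from_values := by
  intro values _
  unfold Spec_pricing_tags_from_values pricing_tags_from_values pricing_tags_from_values_alt
  dsimp only
  apply PySem.List.sorted_eq_of_perm_of_pairwise_lt
  · -- B's list is a permutation of A's set
    apply (List.perm_ext_iff_of_nodup ?_ ?_).2
    · intro x
      simp only [List.mem_map, List.mem_filter, pv_mem_fold, PySem.Set.empty,
        List.not_mem_nil, false_or, List.any_eq_true, List.mem_map, pv_if_id]
      constructor
      · rintro ⟨p, ⟨hp, hc⟩, hx⟩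
        obtain ⟨r, ⟨v, hv, rfl⟩, hk⟩ := hc
        exact ⟨v, hv, by
          unfold pvHit
          simp only [List.any_eq_true, Bool.and_eq_true, beq_iff_eq]
          exact ⟨p, hp, hx, by simpa [pvRaw] using hk⟩⟩
      · rintro ⟨v, hv, hh⟩
        unfold pvHit at hh
        simp only [List.any_eq_true, Bool.and_eq_true, beq_iff_eq] at hh
        obtain ⟨p, hp, hx, hk⟩ := hh
        exact ⟨p, ⟨hp, ⟨pvRaw v, ⟨v, hv, rfl⟩, hk⟩⟩, hx⟩
    · exact List.Nodup.sublist (pv_sublist _) (by simp [pvTagRules])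
    · exact pv_nodup_fold _ _ List.nodup_nil
  · -- B's list is strictly increasing (sublist of the sorted tag names)
    exact List.Pairwise.sublist (pv_sublist _) (by simp [pvTagRules]; decide)
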